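-- pv_equiv track=rewrite | github.com/AkhilaMangipudi/ResQue-Stack-Overflow-Question-Recommendation-System | models/questions_embeddings_cosine.py | findAllQuestionsInACluster
-- ===== SOURCE A (Python) =====
-- def findAllQuestionsInACluster(num_clusters,questions_dict):
--     questions_in_a_cluster_dict = {}
--     for key, value in questions_dict.items():
--         if value[1] in questions_in_a_cluster_dict:
--             questions_in_a_cluster_dict[value[1]].append(key)
--         else:
--             questions_in_a_cluster_dict[value[1]] = [key]
--     return questions_in_a_cluster_dict
-- ===== SOURCE B (Python) =====
-- def findAllQuestionsInACluster(num_clusters, questions_dict):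
--     # Two-pass: collect labels in first-appearance order, then one filtering
--     # comprehension per label (instead of A's incremental bucketing).
--     items = list(questions_dict.items())
--     labels = list(dict.fromkeys(v[1] for _, v in items))
--     return {lab: [k for k, v in items if v[1] == lab] for lab in labels}
-- ===== Notes on version B (the rewrite author's own statement) =====
-- stated objective: alternative
-- what changed: Replaces A's single-pass incremental dict bucketing with a two-pass scheme: first collect the distinct cluster labels in first-appearance order, then build each cluster's key list by one filtering comprehension per label.
import Mathlib
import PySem

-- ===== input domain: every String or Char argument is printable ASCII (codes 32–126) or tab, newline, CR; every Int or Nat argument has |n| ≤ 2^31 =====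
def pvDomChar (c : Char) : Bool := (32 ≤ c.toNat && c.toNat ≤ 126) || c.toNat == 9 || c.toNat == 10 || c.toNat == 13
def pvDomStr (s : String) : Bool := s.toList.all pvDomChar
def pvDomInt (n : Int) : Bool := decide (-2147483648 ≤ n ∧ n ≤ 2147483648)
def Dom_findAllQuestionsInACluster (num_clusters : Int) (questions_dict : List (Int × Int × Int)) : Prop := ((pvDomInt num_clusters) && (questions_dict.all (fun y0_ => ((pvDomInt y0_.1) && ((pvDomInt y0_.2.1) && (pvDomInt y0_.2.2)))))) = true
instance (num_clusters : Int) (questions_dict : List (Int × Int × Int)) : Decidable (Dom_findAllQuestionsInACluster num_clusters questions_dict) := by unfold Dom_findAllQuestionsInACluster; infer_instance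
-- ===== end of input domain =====

-- B groups keys by cluster label via dedup-of-labels + one filter per label, instead of
-- A's incremental dict bucketing; objective: alternative decomposition, same return value.

-- ===== PORT A =====
def findAllQuestionsInACluster (num_clusters : Int) (questions_dict : List (Int × Int × Int)) : List (Int × List Int) :=
  (questions_dict.foldl
    (fun d kv =>
      if d.contains kv.2.2 then d.modify kv.2.2 [] (· ++ [kv.1])   -- questions_in_a_cluster_dict[value[1]].append(key)
      else d.insert kv.2.2 [kv.1])                                  -- questions_in_a_cluster_dict[value[1]] = [key]
    PySem.Dict.empty).items

-- ===== PORT B =====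
def findAllQuestionsInACluster_alt (num_clusters : Int) (questions_dict : List (Int × Int × Int)) : List (Int × List Int) :=
  let labels := PySem.List.dedup (questions_dict.map (fun kv => kv.2.2))
  labels.map (fun lab => (lab, (questions_dict.filter (fun kv => kv.2.2 == lab)).map (fun kv => kv.1)))

-- ===== PRECONDITION & SPEC =====
def Spec_findAllQuestionsInACluster (num_clusters : Int) (questions_dict : List (Int × Int × Int)) (out : List (Int × List Int)) : Prop := out = findAllQuestionsInACluster_alt num_clusters questions_dict
instance (num_clusters : Int) (questions_dict : List (Int × Int × Int)) (out : List (Int × List Int)) : Decidable (Spec_findAllQuestionsInACluster num_clusters questions_dict out) := by unfold Spec_findAllQuestionsInACluster; infer_instance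

-- ===== CLAIM (what is proved, stated in full; the proofs are below) =====
def Claim_equal_findAllQuestionsInACluster : Prop := ∀ (num_clusters : Int) (questions_dict : List (Int × Int × Int)), Dom_findAllQuestionsInACluster num_clusters questions_dict → Spec_findAllQuestionsInACluster num_clusters questions_dict (findAllQuestionsInACluster num_clusters questions_dict)

-- ===== LEMMAS AND PROOFS =====

-- A's two branches are one dict 'modify' with default []: when the key is absent,
-- modify appends (k, [] ++ [x]) at the end, which is exactly 'insert k [x]'.
lemma step_eq_modify (d : PySem.Dict Int (List Int)) (kv : Int × Int × Int) :
    (if d.contains kv.2.2 then d.modify kv.2.2 [] (· ++ [kv.1])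
     else d.insert kv.2.2 [kv.1]) = d.modify kv.2.2 [] (· ++ [kv.1]) := by
  by_cases h : d.contains kv.2.2
  · simp [h]
  · have hf : d.contains kv.2.2 = false := by simpa using h
    simp [PySem.Dict.modify, PySem.Dict.insert, hf,
      PySem.Dict.getD_of_not_contains d [] hf]

lemma foldA_eq_foldModify (questions_dict : List (Int × Int × Int)) :
    questions_dict.foldl
      (fun d kv =>
        if d.contains kv.2.2 then d.modify kv.2.2 [] (· ++ [kv.1])
        else d.insert kv.2.2 [kv.1]) PySem.Dict.empty
    = questions_dict.foldl
        (fun d kv => d.modify kv.2.2 [] (· ++ [kv.1])) PySem.Dict.empty := by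
  congr 1
  funext d kv
  exact step_eq_modify d kv

-- The bucketing fold, characterized by the PySem grouping lemmas, via the
-- pair list (label, key) = questions_dict.map (fun kv => (kv.2.2, kv.1)).
lemma fold_as_pairs (questions_dict : List (Int × Int × Int)) :
    questions_dict.foldl (fun d kv => d.modify kv.2.2 [] (· ++ [kv.1])) PySem.Dict.empty
    = (questions_dict.map (fun kv => (kv.2.2, kv.1))).foldl
        (fun d p => d.modify p.1 [] (· ++ [p.2])) PySem.Dict.empty := by
  rw [List.foldl_map]

-- ===== VERDICT (by name: the statement is the Claim_ definition above) =====
theorem findAllQuestionsInACluster_spec : Claim_equal_findAllQuestionsInACluster := by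
  intro num_clusters qd _
  show findAllQuestionsInACluster num_clusters qd = findAllQuestionsInACluster_alt num_clusters qd
  unfold findAllQuestionsInACluster findAllQuestionsInACluster_alt
  rw [foldA_eq_foldModify, fold_as_pairs]
  set l := qd.map (fun kv => (kv.2.2, kv.1)) with hl
  set D := l.foldl (fun d p => d.modify p.1 [] (· ++ [p.2])) PySem.Dict.empty with hD
  have hnd : D.keys.Nodup := by
    rw [hD]
    exact PySem.Dict.nodup_keys_foldl_modify_key l (fun p => p.1) [] (fun _ p => (· ++ [p.2]))
      PySem.Dict.empty (by simp [PySem.Dict.empty, PySem.Dict.keys])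
  have hkeys : D.keys = PySem.List.dedup (qd.map (fun kv => kv.2.2)) := by
    rw [hD]
    rw [PySem.Dict.keys_foldl_modify_key l (fun p => p.1) [] (fun _ p => (· ++ [p.2]))]
    rw [PySem.List.dedup_eq_ofList]
    have : l.map (fun p => p.1) = qd.map (fun kv => kv.2.2) := by
      rw [hl, List.map_map]; rfl
    rw [this]
    rfl
  rw [PySem.Dict.items_eq_map_keys D hnd [], hkeys]
  apply List.map_congr_left
  intro k _
  have hget : D.getD k [] = (qd.filter (fun kv => kv.2.2 == k)).map (fun kv => kv.1) := by
    rw [hD, PySem.Dict.getD_foldl_modify_append l PySem.Dict.empty k]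
    have hempty : (PySem.Dict.empty : PySem.Dict Int (List Int)).getD k [] = [] := rfl
    rw [hempty, List.nil_append, hl, List.filter_map, List.map_map]
    rfl
  rw [hget]
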